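-- pv_equiv track=rewrite | github.com/ReedAndreas/Docuguard | full_demo.py | get_token_spans
-- ===== SOURCE A (Python) =====
-- def get_token_spans(tokens, trailing_whitespace):
--     """Calculates start and end character spans for each token."""
--     spans = []
--     current_char = 0
--     for i, token in enumerate(tokens):
--         start = current_char
--         end = start + len(token)
--         spans.append((start, end))
--         current_char = end
--         # Add 1 for the space if trailing_whitespace is True
--         if i < len(trailing_whitespace) and trailing_whitespace[i]:
--             current_char += 1
--     return spans
-- ===== SOURCE B (Python) =====
-- def get_token_spans(tokens, trailing_whitespace):
--     """Calculates start and end character spans for each token."""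
--     widths = [len(t) + (1 if i < len(trailing_whitespace) and trailing_whitespace[i] else 0)
--               for i, t in enumerate(tokens)]
--     starts = [0]
--     for w in widths:
--         starts.append(starts[-1] + w)
--     return [(s, s + len(t)) for s, t in zip(starts, tokens)]
-- ===== Notes on version B (the rewrite author's own statement) =====
-- stated objective: alternative
-- what changed: B first builds a per-token advance-width table, turns it into a prefix-sum starts array with an append loop, and then emits spans in a separate zip pass over (starts, tokens), instead of A's single loop carrying a running character offset and appending spans as it goes.
import Mathlib
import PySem

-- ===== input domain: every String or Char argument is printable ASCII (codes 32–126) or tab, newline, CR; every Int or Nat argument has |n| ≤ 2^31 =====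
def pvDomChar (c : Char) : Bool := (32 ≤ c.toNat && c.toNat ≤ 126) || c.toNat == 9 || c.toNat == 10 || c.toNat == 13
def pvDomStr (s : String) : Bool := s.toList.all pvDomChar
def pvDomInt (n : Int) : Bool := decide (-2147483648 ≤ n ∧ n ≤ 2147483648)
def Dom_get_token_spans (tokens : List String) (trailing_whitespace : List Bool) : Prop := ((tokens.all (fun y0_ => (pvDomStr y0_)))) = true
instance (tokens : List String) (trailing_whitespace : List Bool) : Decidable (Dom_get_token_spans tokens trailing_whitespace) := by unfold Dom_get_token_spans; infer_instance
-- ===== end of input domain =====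

-- B replaces A's single running-offset loop by a width table, a prefix-sum starts array and a
-- separate zip pass that emits the spans (alternative decomposition, same cost).

-- ===== PORT A =====
def get_token_spans (tokens : List String) (trailing_whitespace : List Bool) : List (Int × Int) :=
  ((PySem.List.enumerate tokens 0).foldl
    (fun (st : List (Int × Int) × Int) p =>
      let start := st.2
      let e := start + PySem.Str.len p.2
      let spans := st.1 ++ [(start, e)]
      let cur := if p.1 < (trailing_whitespace.length : Int) ∧
                    (PySem.List.pyGet? trailing_whitespace p.1).getD false = true
                 then e + 1 else e
      (spans, cur))
    ([], 0)).1

-- ===== PORT B =====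
def get_token_spans_alt (tokens : List String) (trailing_whitespace : List Bool) : List (Int × Int) :=
  let widths := (PySem.List.enumerate tokens 0).map
    (fun p => PySem.Str.len p.2 +
      (if p.1 < (trailing_whitespace.length : Int) ∧
          (PySem.List.pyGet? trailing_whitespace p.1).getD false = true
       then 1 else 0))
  let starts := widths.foldl
    (fun acc w => acc ++ [(PySem.List.pyGet? acc (-1)).getD 0 + w]) [0]
  (starts.zip tokens).map (fun p => (p.1, p.1 + PySem.Str.len p.2))

-- ===== PRECONDITION & SPEC =====
def Spec_get_token_spans (tokens : List String) (trailing_whitespace : List Bool) (out : List (Int × Int)) : Prop := out = get_token_spans_alt tokens trailing_whitespace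
instance (tokens : List String) (trailing_whitespace : List Bool) (out : List (Int × Int)) : Decidable (Spec_get_token_spans tokens trailing_whitespace out) := by unfold Spec_get_token_spans; infer_instance

-- ===== CLAIM (what is proved, stated in full; the proofs are below) =====
def Claim_equal_get_token_spans : Prop := ∀ (tokens : List String) (trailing_whitespace : List Bool), Dom_get_token_spans tokens trailing_whitespace → Spec_get_token_spans tokens trailing_whitespace (get_token_spans tokens trailing_whitespace)

-- ===== LEMMAS AND PROOFS =====

-- reference function: spans of `tokens` when token index starts at s and char offset at c
def pvSpans (tw : List Bool) : List String → Int → Int → List (Int × Int)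
  | [], _, _ => []
  | t :: rest, s, c =>
    (c, c + PySem.Str.len t) ::
      pvSpans tw rest (s + 1)
        (c + PySem.Str.len t +
          (if s < (tw.length : Int) ∧ (PySem.List.pyGet? tw s).getD false = true then 1 else 0))

lemma A_fold (tw : List Bool) :
    ∀ (tokens : List String) (s c : Int) (acc : List (Int × Int)),
    ((PySem.List.enumerate tokens s).foldl
      (fun (st : List (Int × Int) × Int) p =>
        let start := st.2
        let e := start + PySem.Str.len p.2
        let spans := st.1 ++ [(start, e)]
        let cur := if p.1 < (tw.length : Int) ∧
                      (PySem.List.pyGet? tw p.1).getD false = true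
                   then e + 1 else e
        (spans, cur))
      (acc, c)).1 = acc ++ pvSpans tw tokens s c := by
  intro tokens
  induction tokens with
  | nil => intro s c acc; simp [PySem.List.enumerate_nil, pvSpans]
  | cons t rest ih =>
    intro s c acc
    rw [PySem.List.enumerate_cons]
    simp only [List.foldl_cons]
    rw [ih]
    by_cases h : s < (tw.length : Int) ∧ (PySem.List.pyGet? tw s).getD false = true
    · simp [pvSpans, h]
    · simp [pvSpans, h]

-- the prefix-sum starts loop, from any nonempty accumulator whose last entry is c
lemma B_starts (ws : List Int) :
    ∀ (acc : List Int) (c : Int), (PySem.List.pyGet? acc (-1)).getD 0 = c →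
    ws.foldl (fun acc w => acc ++ [(PySem.List.pyGet? acc (-1)).getD 0 + w]) acc
      = acc ++ (ws.foldr (fun w k c => (c + w) :: k (c + w)) (fun _ => []) c) := by
  induction ws with
  | nil => intro acc c _; simp
  | cons w rest ih =>
    intro acc c hc
    simp only [List.foldl_cons, List.foldr_cons]
    rw [hc, ih (acc ++ [c + w]) (c + w) (by rw [PySem.List.pyGet?_neg_one_append_singleton]; rfl)]
    simp

-- combine: zipping the starts chain with tokens yields pvSpans
lemma zip_spans (tw : List Bool) :
    ∀ (tokens : List String) (s c : Int),
    ((c :: ((PySem.List.enumerate tokens s).map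
        (fun p => PySem.Str.len p.2 +
          (if p.1 < (tw.length : Int) ∧ (PySem.List.pyGet? tw p.1).getD false = true then 1 else 0))).foldr
          (fun w k c => (c + w) :: k (c + w)) (fun _ => []) c).zip tokens).map
      (fun p => (p.1, p.1 + PySem.Str.len p.2)) = pvSpans tw tokens s c := by
  intro tokens
  induction tokens with
  | nil => intro s c; simp [PySem.List.enumerate_nil, pvSpans]
  | cons t rest ih =>
    intro s c
    rw [PySem.List.enumerate_cons]
    simp only [List.map_cons, List.foldr_cons, List.zip_cons_cons, List.map_cons, pvSpans]
    congr 1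
    rw [← add_assoc]
    exact ih (s + 1) _

theorem get_token_spans_eq (tokens : List String) (tw : List Bool) :
    get_token_spans tokens tw = get_token_spans_alt tokens tw := by
  unfold get_token_spans get_token_spans_alt
  dsimp only
  rw [A_fold tw tokens 0 0 []]
  rw [B_starts _ [0] 0 (by decide)]
  simp only [List.nil_append, List.singleton_append]
  exact (zip_spans tw tokens 0 0).symm

-- ===== VERDICT (by name: the statement is the Claim_ definition above) =====
theorem get_token_spans_spec : Claim_equal_get_token_spans := by
  intro tokens tw _
  exact get_token_spans_eq tokens tw
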